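-- pv_equiv track=rewrite | github.com/pthanmayee908/curriculum-generator | planner8.py | generate_timetable
-- ===== SOURCE A (Python) =====
-- def generate_timetable(session_data):
--
--     days = ["Monday","Tuesday","Wednesday","Thursday","Friday","Saturday"]
--
--     timetable = {d: [] for d in days}
--
--     topics = []
--
--     for course in session_data:
--         for s in session_data[course]:
--             topics.append({
--                 "course": course,
--                 "topic": s["topic"]
--             })
--
--     i = 0
--     for t in topics:
--         day = days[i % len(days)]
--         timetable[day].append(t)
--         i += 1
--
--     return timetable
-- ===== SOURCE B (Python) =====
-- def generate_timetable(session_data):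
--     days = ["Monday", "Tuesday", "Wednesday", "Thursday", "Friday", "Saturday"]
--     topics = [{"course": course, "topic": s["topic"]}
--               for course, sessions in session_data.items()
--               for s in sessions]
--     return {day: topics[j::6] for j, day in enumerate(days)}
-- ===== Notes on version B (the rewrite author's own statement) =====
-- stated objective: simpler
-- what changed: The flat topics list becomes a single comprehension and the mutating counter loop that appends to days[i % 6] is replaced by a dict comprehension over the six days, each day taking the strided slice topics[j::6].
import Mathlib
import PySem

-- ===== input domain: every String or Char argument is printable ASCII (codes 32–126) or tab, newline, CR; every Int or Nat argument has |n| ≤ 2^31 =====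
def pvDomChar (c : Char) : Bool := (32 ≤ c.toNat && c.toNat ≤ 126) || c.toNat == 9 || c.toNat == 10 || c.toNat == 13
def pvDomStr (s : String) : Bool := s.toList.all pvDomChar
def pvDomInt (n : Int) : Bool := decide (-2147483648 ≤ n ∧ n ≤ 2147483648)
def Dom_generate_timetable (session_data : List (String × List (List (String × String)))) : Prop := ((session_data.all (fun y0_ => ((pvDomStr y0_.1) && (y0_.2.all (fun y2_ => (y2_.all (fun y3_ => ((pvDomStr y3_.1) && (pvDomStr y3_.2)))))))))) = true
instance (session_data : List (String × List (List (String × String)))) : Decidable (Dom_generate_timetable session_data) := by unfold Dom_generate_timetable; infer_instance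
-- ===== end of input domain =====

-- B: builds the flat topics list as one pass and forms each day's bucket by a strided slice
-- topics[j::6] over the six days instead of A's counter loop mutating days[i % 6] (objective: simpler).


-- ===== PORT A =====
-- Python dicts are given as association lists; PySem.Dict.ofList normalises them exactly as
-- Python's dict construction does (first-occurrence position, last value wins).
-- s["topic"] would raise KeyError when the key is absent; Pre_ excludes exactly those inputs,
-- so the getD default "" is never read on admitted inputs.
def generate_timetable (session_data : List (String × List (List (String × String)))) : List (String × List (List (String × String))) :=
  let days : List String := ["Monday", "Tuesday", "Wednesday", "Thursday", "Friday", "Saturday"]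
  let timetable : PySem.Dict String (List (List (String × String))) :=
    days.foldl (fun d day => d.insert day []) PySem.Dict.empty
  let topics : List (List (String × String)) :=
    (PySem.Dict.ofList session_data).items.foldl (fun acc cs =>
      cs.2.foldl (fun acc2 s =>
        acc2 ++ [[("course", cs.1), ("topic", (PySem.Dict.ofList s).getD "topic" "")]]) acc) []
  let fin :=
    topics.foldl (fun (st : PySem.Dict String (List (List (String × String))) × Nat) t =>
      let day := days.getD (st.2 % days.length) ""
      (st.1.modify day [] (fun l => l ++ [t]), st.2 + 1)) (timetable, 0)
  fin.1.items

-- ===== PORT B =====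
def generate_timetable_alt (session_data : List (String × List (List (String × String)))) : List (String × List (List (String × String))) :=
  let days : List String := ["Monday", "Tuesday", "Wednesday", "Thursday", "Friday", "Saturday"]
  let topics : List (List (String × String)) :=
    (PySem.Dict.ofList session_data).items.flatMap (fun cs =>
      cs.2.map (fun s => [("course", cs.1), ("topic", (PySem.Dict.ofList s).getD "topic" "")]))
  (PySem.List.enumerate days).map (fun jd =>
    (jd.2, (PySem.List.slice? topics (some jd.1) none 6).getD []))

-- ===== PRECONDITION & SPEC =====
-- Pre_ excludes exactly the inputs on which Python A raises KeyError: a session dict that,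
-- after Python's dict normalisation of session_data, is reached by the loop and has no "topic" key.
def Pre_generate_timetable (session_data : List (String × List (List (String × String)))) : Prop :=
  ∀ p ∈ (PySem.Dict.ofList session_data).items, ∀ s ∈ p.2, s.any (fun kv => kv.1 == "topic") = true
instance (session_data : List (String × List (List (String × String)))) : Decidable (Pre_generate_timetable session_data) := by unfold Pre_generate_timetable; infer_instance

def pvWitness_generate_timetable : (List (String × List (List (String × String)))) :=
  [("math", [[("topic", "algebra")], [("topic", "sets"), ("note", "x")]]), ("cs", [[("topic", "lists")]])]

def Spec_generate_timetable (session_data : List (String × List (List (String × String)))) (out : List (String × List (List (String × String)))) : Prop := out = generate_timetable_alt session_data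
instance (session_data : List (String × List (List (String × String)))) (out : List (String × List (List (String × String)))) : Decidable (Spec_generate_timetable session_data out) := by unfold Spec_generate_timetable; infer_instance

-- ===== CLAIM (what is proved, stated in full; the proofs are below) =====
def Claim_equal_generate_timetable : Prop := ∀ (session_data : List (String × List (List (String × String)))), Dom_generate_timetable session_data → Pre_generate_timetable session_data → Spec_generate_timetable session_data (generate_timetable session_data)

-- ===== LEMMAS AND PROOFS =====


-- every 6th element of xs starting at offset o (the mathematical meaning of both buckets)
def takeEvery {α : Type} : Nat → List α → List α
  | _, [] => []
  | 0, x :: xs => x :: takeEvery 5 xs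
  | o + 1, _ :: xs => takeEvery o xs

theorem takeEvery_eq_filterMap {α : Type} (xs : List α) (o : Nat) :
    takeEvery o xs = (List.range xs.length).filterMap (fun k => xs[o + 6 * k]?) := by
  induction xs generalizing o with
  | nil => simp [takeEvery]
  | cons x xs ih =>
    cases o with
    | zero =>
      rw [takeEvery, List.length_cons, List.range_succ_eq_map, List.filterMap_cons,
        List.filterMap_map]
      simp only [Function.comp]
      have h : ∀ k : Nat, (x :: xs)[0 + 6 * (k + 1)]? = xs[5 + 6 * k]? := by
        intro k
        have : 0 + 6 * (k + 1) = (5 + 6 * k) + 1 := by omega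
        rw [this, List.getElem?_cons_succ]
      simp only [Nat.zero_add, Nat.mul_zero, List.getElem?_cons_zero]
      congr 1
      rw [ih 5]
      apply List.filterMap_congr
      intro k _
      have e : 6 * k.succ = 0 + 6 * (k + 1) := by omega
      rw [e]
      exact (h k).symm
    | succ o =>
      rw [takeEvery, List.length_cons, List.range_succ, List.filterMap_append]
      have h : ∀ k : Nat, (x :: xs)[(o + 1) + 6 * k]? = xs[o + 6 * k]? := by
        intro k
        have : (o + 1) + 6 * k = (o + 6 * k) + 1 := by omega
        rw [this, List.getElem?_cons_succ]
      rw [List.filterMap_congr (fun k _ => h k), ih o]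
      have hn : (x :: xs)[(o + 1) + 6 * xs.length]? = none := by
        apply List.getElem?_eq_none
        simp only [List.length_cons]; omega
      simp [hn]

theorem filterMap_range_stab {α : Type} (f : Nat → Option α) (c M : Nat) (hc : c ≤ M)
    (h : ∀ k, c ≤ k → f k = none) :
    (List.range M).filterMap f = (List.range c).filterMap f := by
  induction M with
  | zero =>
    have : c = 0 := by omega
    rw [this]
  | succ M ih =>
    rcases Nat.lt_or_ge c (M + 1) with hlt | hge
    · rw [List.range_succ, List.filterMap_append, ih (by omega)]
      simp [h M (by omega)]
    · have : c = M + 1 := by omega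
      rw [this]

theorem slice6 {α : Type} (xs : List α) (j : Nat) :
    PySem.List.slice? xs (some (j : Int)) none 6 = some (takeEvery j xs) := by
  simp only [PySem.List.slice?, PySem.List.sliceIndices]
  have hj0 : ¬ ((j : Int) < 0) := not_lt.mpr (Int.natCast_nonneg j)
  norm_num [if_neg hj0]
  rcases Nat.lt_or_ge j xs.length with hlt | hge
  · have hmin : min (j : Int) (xs.length : Int) = (j : Int) := by omega
    rw [hmin, if_pos hlt]
    have hcount : (((xs.length : Int) - (j : Int) + 6 - 1) / 6).toNat = (xs.length - j + 5) / 6 := by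
      omega
    rw [hcount]
    have hidx : ∀ k : Nat, (((j : Int) + 6 * (k : Int)).toNat) = j + 6 * k := by
      intro k; omega
    have hfun : ∀ k ∈ List.range ((xs.length - j + 5) / 6),
        xs[(((j : Int) + 6 * (k : Int)).toNat)]? = xs[j + 6 * k]? := by
      intro k _; rw [hidx k]
    rw [List.filterMap_congr hfun, takeEvery_eq_filterMap]
    exact (filterMap_range_stab _ _ _ (by omega)
      (fun k hk => List.getElem?_eq_none (by omega))).symm
  · have hmin : min (j : Int) (xs.length : Int) = (xs.length : Int) := by omega
    rw [hmin, if_neg (not_lt.mpr hge)]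
    simp only [List.range_zero, List.filterMap_nil]
    rw [takeEvery_eq_filterMap]
    exact (List.filterMap_eq_nil_iff.mpr (fun k hk => List.getElem?_eq_none (by omega))).symm

-- the literal six-day list, as in both ports
def pvDays : List String := ["Monday", "Tuesday", "Wednesday", "Thursday", "Friday", "Saturday"]

theorem step0 (i : Nat) (h : i % 6 = 0) (t : List (String × String))
    (b0 b1 b2 b3 b4 b5 : List (List (String × String))) :
    (PySem.Dict.mk [("Monday", b0), ("Tuesday", b1), ("Wednesday", b2), ("Thursday", b3), ("Friday", b4), ("Saturday", b5)]).modify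
      (pvDays.getD (i % pvDays.length) "") [] (fun l => l ++ [t])
    = PySem.Dict.mk [("Monday", b0 ++ [t]), ("Tuesday", b1), ("Wednesday", b2), ("Thursday", b3), ("Friday", b4), ("Saturday", b5)] := by
  simp [pvDays, h, PySem.Dict.modify, PySem.Dict.getD, PySem.Dict.get?, PySem.Dict.insert,
    PySem.Dict.contains]

theorem step1 (i : Nat) (h : i % 6 = 1) (t : List (String × String))
    (b0 b1 b2 b3 b4 b5 : List (List (String × String))) :
    (PySem.Dict.mk [("Monday", b0), ("Tuesday", b1), ("Wednesday", b2), ("Thursday", b3), ("Friday", b4), ("Saturday", b5)]).modify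
      (pvDays.getD (i % pvDays.length) "") [] (fun l => l ++ [t])
    = PySem.Dict.mk [("Monday", b0), ("Tuesday", b1 ++ [t]), ("Wednesday", b2), ("Thursday", b3), ("Friday", b4), ("Saturday", b5)] := by
  simp [pvDays, h, PySem.Dict.modify, PySem.Dict.getD, PySem.Dict.get?, PySem.Dict.insert,
    PySem.Dict.contains]

theorem step2 (i : Nat) (h : i % 6 = 2) (t : List (String × String))
    (b0 b1 b2 b3 b4 b5 : List (List (String × String))) :
    (PySem.Dict.mk [("Monday", b0), ("Tuesday", b1), ("Wednesday", b2), ("Thursday", b3), ("Friday", b4), ("Saturday", b5)]).modify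
      (pvDays.getD (i % pvDays.length) "") [] (fun l => l ++ [t])
    = PySem.Dict.mk [("Monday", b0), ("Tuesday", b1), ("Wednesday", b2 ++ [t]), ("Thursday", b3), ("Friday", b4), ("Saturday", b5)] := by
  simp [pvDays, h, PySem.Dict.modify, PySem.Dict.getD, PySem.Dict.get?, PySem.Dict.insert,
    PySem.Dict.contains]

theorem step3 (i : Nat) (h : i % 6 = 3) (t : List (String × String))
    (b0 b1 b2 b3 b4 b5 : List (List (String × String))) :
    (PySem.Dict.mk [("Monday", b0), ("Tuesday", b1), ("Wednesday", b2), ("Thursday", b3), ("Friday", b4), ("Saturday", b5)]).modify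
      (pvDays.getD (i % pvDays.length) "") [] (fun l => l ++ [t])
    = PySem.Dict.mk [("Monday", b0), ("Tuesday", b1), ("Wednesday", b2), ("Thursday", b3 ++ [t]), ("Friday", b4), ("Saturday", b5)] := by
  simp [pvDays, h, PySem.Dict.modify, PySem.Dict.getD, PySem.Dict.get?, PySem.Dict.insert,
    PySem.Dict.contains]

theorem step4 (i : Nat) (h : i % 6 = 4) (t : List (String × String))
    (b0 b1 b2 b3 b4 b5 : List (List (String × String))) :
    (PySem.Dict.mk [("Monday", b0), ("Tuesday", b1), ("Wednesday", b2), ("Thursday", b3), ("Friday", b4), ("Saturday", b5)]).modify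
      (pvDays.getD (i % pvDays.length) "") [] (fun l => l ++ [t])
    = PySem.Dict.mk [("Monday", b0), ("Tuesday", b1), ("Wednesday", b2), ("Thursday", b3), ("Friday", b4 ++ [t]), ("Saturday", b5)] := by
  simp [pvDays, h, PySem.Dict.modify, PySem.Dict.getD, PySem.Dict.get?, PySem.Dict.insert,
    PySem.Dict.contains]

theorem step5 (i : Nat) (h : i % 6 = 5) (t : List (String × String))
    (b0 b1 b2 b3 b4 b5 : List (List (String × String))) :
    (PySem.Dict.mk [("Monday", b0), ("Tuesday", b1), ("Wednesday", b2), ("Thursday", b3), ("Friday", b4), ("Saturday", b5)]).modify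
      (pvDays.getD (i % pvDays.length) "") [] (fun l => l ++ [t])
    = PySem.Dict.mk [("Monday", b0), ("Tuesday", b1), ("Wednesday", b2), ("Thursday", b3), ("Friday", b4), ("Saturday", b5 ++ [t])] := by
  simp [pvDays, h, PySem.Dict.modify, PySem.Dict.getD, PySem.Dict.get?, PySem.Dict.insert,
    PySem.Dict.contains]

theorem loop_inv (ts : List (List (String × String))) :
    ∀ (i : Nat) (b0 b1 b2 b3 b4 b5 : List (List (String × String))),
    (ts.foldl (fun (st : PySem.Dict String (List (List (String × String))) × Nat) t =>
        (st.1.modify (pvDays.getD (st.2 % pvDays.length) "") [] (fun l => l ++ [t]), st.2 + 1))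
      (PySem.Dict.mk [("Monday", b0), ("Tuesday", b1), ("Wednesday", b2), ("Thursday", b3), ("Friday", b4), ("Saturday", b5)], i)).1
    = PySem.Dict.mk [("Monday", b0 ++ takeEvery ((0 + 6 - i % 6) % 6) ts),
        ("Tuesday", b1 ++ takeEvery ((1 + 6 - i % 6) % 6) ts),
        ("Wednesday", b2 ++ takeEvery ((2 + 6 - i % 6) % 6) ts),
        ("Thursday", b3 ++ takeEvery ((3 + 6 - i % 6) % 6) ts),
        ("Friday", b4 ++ takeEvery ((4 + 6 - i % 6) % 6) ts),
        ("Saturday", b5 ++ takeEvery ((5 + 6 - i % 6) % 6) ts)] := by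
  induction ts with
  | nil => intro i b0 b1 b2 b3 b4 b5; simp [takeEvery]
  | cons t ts ih =>
    intro i b0 b1 b2 b3 b4 b5
    have h : i % 6 = 0 ∨ i % 6 = 1 ∨ i % 6 = 2 ∨ i % 6 = 3 ∨ i % 6 = 4 ∨ i % 6 = 5 := by omega
    rcases h with h|h|h|h|h|h
    · have h2 : (i + 1) % 6 = 1 := by omega
      rw [List.foldl_cons]
      dsimp only
      rw [step0 i h, ih (i + 1)]
      simp [h, h2, takeEvery]
    · have h2 : (i + 1) % 6 = 2 := by omega
      rw [List.foldl_cons]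
      dsimp only
      rw [step1 i h, ih (i + 1)]
      simp [h, h2, takeEvery]
    · have h2 : (i + 1) % 6 = 3 := by omega
      rw [List.foldl_cons]
      dsimp only
      rw [step2 i h, ih (i + 1)]
      simp [h, h2, takeEvery]
    · have h2 : (i + 1) % 6 = 4 := by omega
      rw [List.foldl_cons]
      dsimp only
      rw [step3 i h, ih (i + 1)]
      simp [h, h2, takeEvery]
    · have h2 : (i + 1) % 6 = 5 := by omega
      rw [List.foldl_cons]
      dsimp only
      rw [step4 i h, ih (i + 1)]
      simp [h, h2, takeEvery]
    · have h2 : (i + 1) % 6 = 0 := by omega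
      rw [List.foldl_cons]
      dsimp only
      rw [step5 i h, ih (i + 1)]
      simp [h, h2, takeEvery]


theorem foldl_append_singleton {α β : Type} (l : List α) (f : α → β) :
    ∀ init : List β, l.foldl (fun acc b => acc ++ [f b]) init = init ++ l.map f := by
  induction l with
  | nil => intro init; simp
  | cons a l ih => intro init; simp [ih]

theorem nested_foldl_eq_flatMap {α β γ : Type} (l : List α) (g : α → List β) (f : α → β → γ) :
    ∀ init : List γ,
      l.foldl (fun acc a => (g a).foldl (fun acc2 b => acc2 ++ [f a b]) acc) init
      = init ++ l.flatMap (fun a => (g a).map (f a)) := by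
  induction l with
  | nil => intro init; simp
  | cons a l ih =>
    intro init
    rw [List.foldl_cons, foldl_append_singleton, ih, List.flatMap_cons, List.append_assoc]

theorem ports_agree : ∀ sd, generate_timetable sd = generate_timetable_alt sd := by
  intro sd
  unfold generate_timetable generate_timetable_alt
  dsimp only
  rw [nested_foldl_eq_flatMap ((PySem.Dict.ofList sd).items)
    (fun cs => cs.2)
    (fun cs s => [("course", cs.1), ("topic", (PySem.Dict.ofList s).getD "topic" "")]) []]
  rw [List.nil_append]
  set tp := List.flatMap
      (fun a => List.map (fun s => [("course", a.1), ("topic", (PySem.Dict.ofList s).getD "topic" "")]) a.2)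
      (PySem.Dict.ofList sd).items with htp
  rw [show (["Monday", "Tuesday", "Wednesday", "Thursday", "Friday", "Saturday"] : List String) = pvDays from rfl]
  rw [show (pvDays.foldl (fun d day => d.insert day []) PySem.Dict.empty)
      = PySem.Dict.mk [("Monday", []), ("Tuesday", []), ("Wednesday", []), ("Thursday", []),
          ("Friday", []), ("Saturday", [])] from rfl]
  rw [loop_inv tp 0 [] [] [] [] [] []]
  have e0 : PySem.List.slice? tp (some (0 : Int)) none 6 = some (takeEvery 0 tp) := by
    simpa using slice6 tp 0
  have e1 : PySem.List.slice? tp (some (1 : Int)) none 6 = some (takeEvery 1 tp) := by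
    simpa using slice6 tp 1
  have e2 : PySem.List.slice? tp (some (2 : Int)) none 6 = some (takeEvery 2 tp) := by
    simpa using slice6 tp 2
  have e3 : PySem.List.slice? tp (some (3 : Int)) none 6 = some (takeEvery 3 tp) := by
    simpa using slice6 tp 3
  have e4 : PySem.List.slice? tp (some (4 : Int)) none 6 = some (takeEvery 4 tp) := by
    simpa using slice6 tp 4
  have e5 : PySem.List.slice? tp (some (5 : Int)) none 6 = some (takeEvery 5 tp) := by
    simpa using slice6 tp 5
  simp [pvDays, PySem.List.enumerate, e0, e1, e2, e3, e4, e5]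

-- ===== VERDICT (by name: the statement is the Claim_ definition above) =====
theorem generate_timetable_spec : Claim_equal_generate_timetable := by
  intro sd _ _
  show generate_timetable sd = generate_timetable_alt sd
  exact ports_agree sd
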